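-- pv_equiv track=rewrite | github.com/theodorahaimoff/HSLU_HS25_DSPRO1 | src/app_backend.py | pack_context
-- ===== SOURCE A (Python) =====
-- MAX_CTX_CHARS = 8000
--
-- def pack_context(retrieved, max_chars=MAX_CTX_CHARS, per_source_cap=3, label="CTX"):
--     ctx, total, seen = [], 0, {}
--     for doc, meta, dist in retrieved:
--         key = (meta.get("doc_type"), meta.get("law"), meta.get("article"))
--         seen[key] = seen.get(key, 0) + 1
--         if seen[key] > per_source_cap:
--             continue
--         stamp = f"[{label} {meta.get('doc_type','?')} | {meta.get('law','?')} | {meta.get('title','?')} | {meta.get('source','')}]"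
--         block = f"{stamp}\n{doc.strip()}\n\n"
--         if total + len(block) > max_chars:
--             break
--         ctx.append(block)
--         total += len(block)
--     return "".join(ctx)
-- ===== SOURCE B (Python) =====
-- MAX_CTX_CHARS = 8000
--
-- def _block(label, doc, meta):
--     stamp = f"[{label} {meta.get('doc_type','?')} | {meta.get('law','?')} | {meta.get('title','?')} | {meta.get('source','')}]"
--     return f"{stamp}\n{doc.strip()}\n\n"
--
-- def pack_context(retrieved, max_chars=MAX_CTX_CHARS, per_source_cap=3, label="CTX"):
--     # pass 1: per-source-cap filter (the counter counts every doc, even over-cap ones)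
--     seen = {}
--     candidates = []
--     for doc, meta, dist in retrieved:
--         key = (meta.get("doc_type"), meta.get("law"), meta.get("article"))
--         seen[key] = seen.get(key, 0) + 1
--         if seen[key] <= per_source_cap:
--             candidates.append(_block(label, doc, meta))
--     # pass 2: longest prefix of the candidates fitting the character budget
--     kept, total = [], 0
--     for block in candidates:
--         if total + len(block) > max_chars:
--             break
--         kept.append(block)
--         total += len(block)
--     return "".join(kept)
-- ===== Notes on version B (the rewrite author's own statement) =====
-- stated objective: simpler
-- what changed: A's single loop carrying ctx/total/seen with an in-loop break is split into two plain passes: one that applies the per-source cap and collects formatted blocks, and one that takes the longest prefix fitting the character budget, then joins.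
import Mathlib
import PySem

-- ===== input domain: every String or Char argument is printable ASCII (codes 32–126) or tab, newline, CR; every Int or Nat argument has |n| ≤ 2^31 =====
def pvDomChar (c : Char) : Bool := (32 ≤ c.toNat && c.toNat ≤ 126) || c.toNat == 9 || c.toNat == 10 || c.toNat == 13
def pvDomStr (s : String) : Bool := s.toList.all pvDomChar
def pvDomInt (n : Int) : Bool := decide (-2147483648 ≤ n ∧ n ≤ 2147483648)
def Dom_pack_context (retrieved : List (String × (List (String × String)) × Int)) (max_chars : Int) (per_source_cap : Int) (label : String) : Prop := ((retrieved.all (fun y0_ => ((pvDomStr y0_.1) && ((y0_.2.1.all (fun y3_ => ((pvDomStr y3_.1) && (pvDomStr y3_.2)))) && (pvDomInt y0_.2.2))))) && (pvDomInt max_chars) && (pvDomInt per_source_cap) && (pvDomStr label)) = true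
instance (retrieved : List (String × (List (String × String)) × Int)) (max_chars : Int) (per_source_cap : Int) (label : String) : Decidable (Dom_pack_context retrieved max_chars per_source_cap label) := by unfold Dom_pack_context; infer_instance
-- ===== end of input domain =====

-- B re-decomposes A's single break-carrying loop into two passes (cap-filter, then budget prefix); objective: simpler, same cost.
-- mta dicts arrive as association lists; lookups go through PySem.Dict.ofList (= Python dict built from the pairs).

-- ===== PORT A =====
def pvMetaGet? (mta : List (String × String)) (k : String) : Option String :=
  (PySem.Dict.ofList mta).get? k

def pvMetaGetD (mta : List (String × String)) (k d : String) : String :=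
  (PySem.Dict.ofList mta).getD k d

def pcKey (mta : List (String × String)) : Option String × Option String × Option String :=
  (pvMetaGet? mta "doc_type", pvMetaGet? mta "law", pvMetaGet? mta "article")

-- A's loop: ctx/total/seen carried through, 'break' modelled by returning ctx
def packA_loop (max_chars per_source_cap : Int) (label : String) :
    List (String × (List (String × String)) × Int) → List String → Int →
    PySem.Dict (Option String × Option String × Option String) Int → List String
  | [], ctx, _, _ => ctx
  | (doc, mta, _dist) :: rest, ctx, total, seen =>
    let key := pcKey mta
    let cnt := seen.getD key 0 + 1
    let seen' := seen.insert key cnt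
    if cnt > per_source_cap then
      packA_loop max_chars per_source_cap label rest ctx total seen'
    else
      let stamp := "[" ++ label ++ " " ++ pvMetaGetD mta "doc_type" "?" ++ " | " ++
        pvMetaGetD mta "law" "?" ++ " | " ++ pvMetaGetD mta "title" "?" ++ " | " ++
        pvMetaGetD mta "source" "" ++ "]"
      let block := stamp ++ "\n" ++ PySem.Str.strip doc ++ "\n\n"
      if total + PySem.Str.len block > max_chars then ctx
      else packA_loop max_chars per_source_cap label rest (ctx ++ [block])
             (total + PySem.Str.len block) seen'

def pack_context (retrieved : List (String × (List (String × String)) × Int)) (max_chars : Int) (per_source_cap : Int) (label : String) : String :=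
  PySem.Str.join "" (packA_loop max_chars per_source_cap label retrieved [] 0 PySem.Dict.empty)

-- ===== PORT B =====
def pcBlock (label doc : String) (mta : List (String × String)) : String :=
  let stamp := "[" ++ label ++ " " ++ pvMetaGetD mta "doc_type" "?" ++ " | " ++
    pvMetaGetD mta "law" "?" ++ " | " ++ pvMetaGetD mta "title" "?" ++ " | " ++
    pvMetaGetD mta "source" "" ++ "]"
  stamp ++ "\n" ++ PySem.Str.strip doc ++ "\n\n"

-- pass 1: per-source-cap filter (the counter counts every doc, even over-cap ones)
def packB_cands (per_source_cap : Int) (label : String) :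
    List (String × (List (String × String)) × Int) →
    PySem.Dict (Option String × Option String × Option String) Int → List String
  | [], _ => []
  | (doc, mta, _dist) :: rest, seen =>
    let key := pcKey mta
    let cnt := seen.getD key 0 + 1
    let seen' := seen.insert key cnt
    if cnt ≤ per_source_cap then
      pcBlock label doc mta :: packB_cands per_source_cap label rest seen'
    else
      packB_cands per_source_cap label rest seen'

-- pass 2: longest prefix of the candidates fitting the character budget
def packB_take (max_chars : Int) : List String → Int → List String
  | [], _ => []
  | b :: rest, total =>
    if total + PySem.Str.len b > max_chars then []
    else b :: packB_take max_chars rest (total + PySem.Str.len b)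

def pack_context_alt (retrieved : List (String × (List (String × String)) × Int)) (max_chars : Int) (per_source_cap : Int) (label : String) : String :=
  PySem.Str.join "" (packB_take max_chars (packB_cands per_source_cap label retrieved PySem.Dict.empty) 0)

-- ===== PRECONDITION & SPEC =====
def Spec_pack_context (retrieved : List (String × (List (String × String)) × Int)) (max_chars : Int) (per_source_cap : Int) (label : String) (out : String) : Prop := out = pack_context_alt retrieved max_chars per_source_cap label
instance (retrieved : List (String × (List (String × String)) × Int)) (max_chars : Int) (per_source_cap : Int) (label : String) (out : String) : Decidable (Spec_pack_context retrieved max_chars per_source_cap label out) := by unfold Spec_pack_context; infer_instance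

-- ===== CLAIM (what is proved, stated in full; the proofs are below) =====
def Claim_equal_pack_context : Prop := ∀ (retrieved : List (String × (List (String × String)) × Int)) (max_chars : Int) (per_source_cap : Int) (label : String), Dom_pack_context retrieved max_chars per_source_cap label → Spec_pack_context retrieved max_chars per_source_cap label (pack_context retrieved max_chars per_source_cap label)

-- ===== LEMMAS AND PROOFS =====
theorem packA_loop_eq (mc cap : Int) (lab : String) :
    ∀ (rs : List (String × (List (String × String)) × Int)) (ctx : List String)
      (total : Int) (seen : PySem.Dict (Option String × Option String × Option String) Int),
      packA_loop mc cap lab rs ctx total seen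
        = ctx ++ packB_take mc (packB_cands cap lab rs seen) total
  | [], ctx, total, seen => by
      simp [packA_loop, packB_cands, packB_take]
  | (doc, mta, dist) :: rest, ctx, total, seen => by
      simp only [packA_loop, packB_cands, pcBlock]
      split_ifs with h1 h2 h3 h4 <;> try omega
      · exact packA_loop_eq mc cap lab rest ctx total _
      · rw [packB_take, if_pos h3, List.append_nil]
      · rw [packA_loop_eq mc cap lab rest (ctx ++ [_]) _ _, packB_take, if_neg h3,
          List.append_assoc, List.singleton_append]

-- ===== VERDICT (by name: the statement is the Claim_ definition above) =====
theorem pack_context_spec : Claim_equal_pack_context := by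
  intro retrieved mc cap lab _
  unfold Spec_pack_context pack_context pack_context_alt
  rw [packA_loop_eq]
  simp
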